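-- pv_equiv track=rewrite | github.com/minhoo-main/Investing_crypto | models/termstruc.py | find_closest_indices
-- ===== SOURCE A (Python) =====
-- def find_closest_indices(ls, x0):
--     smaller_than_threshold_indices = [i for i, x in enumerate(ls) if x < x0]
--     larger_than_threshold_indices = [i for i, x in enumerate(ls) if x > x0]
--
--     if smaller_than_threshold_indices:
--         max_smaller_index = max(smaller_than_threshold_indices)
--     else:
--         max_smaller_index = None
--
--     if larger_than_threshold_indices:
--         min_larger_index = min(larger_than_threshold_indices)
--     else:
--         min_larger_index = None
--
--     return max_smaller_index, min_larger_index
-- ===== SOURCE B (Python) =====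
-- def find_closest_indices(ls, x0):
--     last_below = None
--     first_above = None
--     for i, x in enumerate(ls):
--         if x < x0:
--             last_below = i
--         if x > x0 and first_above is None:
--             first_above = i
--     return last_below, first_above
-- ===== Notes on version B (the rewrite author's own statement) =====
-- stated objective: simpler
-- what changed: Replaced the two list comprehensions plus max()/min() calls with a single pass that tracks two scalars (last index below, first index above), exploiting that enumerate yields indices in increasing order.
import Mathlib
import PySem

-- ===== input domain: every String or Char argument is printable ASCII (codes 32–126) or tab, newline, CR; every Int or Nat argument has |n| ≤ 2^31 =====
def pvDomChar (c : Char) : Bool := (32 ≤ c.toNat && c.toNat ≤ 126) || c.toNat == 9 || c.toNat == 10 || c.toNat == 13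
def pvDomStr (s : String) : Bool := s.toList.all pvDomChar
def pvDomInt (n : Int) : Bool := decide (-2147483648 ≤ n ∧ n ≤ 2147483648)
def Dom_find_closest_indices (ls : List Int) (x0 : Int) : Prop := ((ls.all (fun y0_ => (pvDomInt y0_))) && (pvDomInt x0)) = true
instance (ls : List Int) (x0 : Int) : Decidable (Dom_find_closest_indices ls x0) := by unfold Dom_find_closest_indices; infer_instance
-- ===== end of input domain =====

-- B replaces the two comprehensions + max()/min() with one pass tracking two scalars (simpler, no intermediate lists).

-- ===== PORT A =====
-- literal port: build both index lists by filtering enumerate, then max / min (None on empty list)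
def find_closest_indices (ls : List Int) (x0 : Int) : Option Int × Option Int :=
  let smaller := ((PySem.List.enumerate ls 0).filter (fun p => p.2 < x0)).map Prod.fst
  let larger := ((PySem.List.enumerate ls 0).filter (fun p => p.2 > x0)).map Prod.fst
  let max_smaller : Option Int := if smaller ≠ [] then PySem.List.max? smaller (fun x => x) else none
  let min_larger : Option Int := if larger ≠ [] then PySem.List.min? larger (fun x => x) else none
  (max_smaller, min_larger)

-- ===== PORT B =====
-- one loop iteration of B: overwrite last_below when x < x0; set first_above once when x > x0
def fciStep (x0 : Int) (st : Option Int × Option Int) (p : Int × Int) : Option Int × Option Int :=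
  ((if p.2 < x0 then some p.1 else st.1),
   (if p.2 > x0 ∧ st.2 = none then some p.1 else st.2))

def find_closest_indices_alt (ls : List Int) (x0 : Int) : Option Int × Option Int :=
  (PySem.List.enumerate ls 0).foldl (fciStep x0) (none, none)

-- ===== PRECONDITION & SPEC =====
def Spec_find_closest_indices (ls : List Int) (x0 : Int) (out : Option Int × Option Int) : Prop := out = find_closest_indices_alt ls x0
instance (ls : List Int) (x0 : Int) (out : Option Int × Option Int) : Decidable (Spec_find_closest_indices ls x0 out) := by unfold Spec_find_closest_indices; infer_instance

-- ===== CLAIM (what is proved, stated in full; the proofs are below) =====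
def Claim_equal_find_closest_indices : Prop := ∀ (ls : List Int) (x0 : Int), Dom_find_closest_indices ls x0 → Spec_find_closest_indices ls x0 (find_closest_indices ls x0)

-- ===== LEMMAS AND PROOFS =====

theorem getLast?_cons_or {α : Type} (a : α) (l : List α) :
    (a :: l).getLast? = l.getLast?.or (some a) := by
  rw [List.getLast?_cons]; cases l.getLast? <;> rfl

-- on a strictly increasing list, Python's max is the last element
theorem max?_pairwise_lt (L : List Int) (h : L.Pairwise (· < ·)) :
    PySem.List.max? L (fun x => x) = L.getLast? := by
  cases hL : L with
  | nil => exact (PySem.List.max?_eq_none_iff [] _).mpr rfl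
  | cons a t =>
    subst hL
    obtain ⟨m, hm⟩ : ∃ m, PySem.List.max? (a :: t) (fun x => x) = some m := by
      cases hmx : PySem.List.max? (a :: t) (fun x => x) with
      | none => exact absurd ((PySem.List.max?_eq_none_iff _ _).mp hmx) (by simp)
      | some m => exact ⟨m, rfl⟩
    have hne : (a :: t) ≠ [] := by simp
    have hmem := PySem.List.max?_mem hm
    have hle := PySem.List.max?_id_le hm
    rw [hm, List.getLast?_eq_some_getLast (h := hne)]
    have hg := List.getLast_mem hne
    have hgm : (a :: t).getLast hne ≤ m := hle _ hg
    have hmg : m ≤ (a :: t).getLast hne := by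
      have hsplit := (List.dropLast_append_getLast hne).symm
      rw [hsplit] at hmem h
      rcases List.mem_append.mp hmem with hmd | hms
      · exact le_of_lt ((List.pairwise_append.mp h).2.2 _ hmd _ (by simp))
      · simp at hms; omega
    have : m = (a :: t).getLast hne := le_antisymm hmg hgm
    rw [this]

-- on a strictly increasing list, Python's min is the first element
theorem min?_pairwise_lt (L : List Int) (h : L.Pairwise (· < ·)) :
    PySem.List.min? L (fun x => x) = L.head? := by
  cases hL : L with
  | nil => exact (PySem.List.min?_eq_none_iff [] _).mpr rfl
  | cons a t =>
    subst hL
    obtain ⟨m, hm⟩ : ∃ m, PySem.List.min? (a :: t) (fun x => x) = some m := by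
      cases hmx : PySem.List.min? (a :: t) (fun x => x) with
      | none => exact absurd ((PySem.List.min?_eq_none_iff _ _).mp hmx) (by simp)
      | some m => exact ⟨m, rfl⟩
    have hmem := PySem.List.min?_mem hm
    have hle := PySem.List.min?_id_le hm
    have hma : m ≤ a := hle _ (by simp)
    have : m = a := by
      rcases List.mem_cons.mp hmem with h1 | h2
      · exact h1
      · exact absurd hma (not_le.mpr ((List.pairwise_cons.mp h).1 _ h2))
    simp [hm, this]

-- invariant of B's loop over enumerate: last below-index (or the incoming one), first above-index (once set, kept)
theorem fci_fold (x0 : Int) (ls : List Int) (s : Int) (lb fa : Option Int) :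
    (PySem.List.enumerate ls s).foldl (fciStep x0) (lb, fa) =
    ((((PySem.List.enumerate ls s).filter (fun p => p.2 < x0)).map Prod.fst).getLast?.or lb,
     fa.or ((((PySem.List.enumerate ls s).filter (fun p => p.2 > x0)).map Prod.fst).head?)) := by
  induction ls generalizing s lb fa with
  | nil => simp [PySem.List.enumerate]
  | cons x xs ih =>
    rw [PySem.List.enumerate_cons, List.foldl_cons]
    by_cases hlt : x < x0
    · have hgt : ¬ (x > x0) := by omega
      cases fa <;>
        simp [fciStep, hlt, hgt, ih, getLast?_cons_or]
    · by_cases hgt : x > x0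
      · cases fa <;> simp [fciStep, hlt, hgt, ih]
      · cases fa <;> simp [fciStep, hlt, hgt, ih]

theorem fci_pairwise (ls : List Int) (x0 : Int) (c : Int → Int → Bool) :
    (((PySem.List.enumerate ls 0).filter (fun p => c p.2 x0)).map Prod.fst).Pairwise (· < ·) := by
  rw [List.pairwise_map]
  exact ((PySem.List.pairwise_lt_enumerate ls 0).filter _)

-- ===== VERDICT (by name: the statement is the Claim_ definition above) =====
theorem find_closest_indices_spec : Claim_equal_find_closest_indices := by
  intro ls x0 _
  unfold Spec_find_closest_indices find_closest_indices find_closest_indices_alt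
  rw [fci_fold]
  dsimp only
  have hs := max?_pairwise_lt _ (fci_pairwise ls x0 (fun a b => decide (a < b)))
  have hl := min?_pairwise_lt _ (fci_pairwise ls x0 (fun a b => decide (a > b)))
  rw [hs, hl]
  simp only [Option.or_none, Option.none_or, Prod.mk.injEq]
  constructor
  · split_ifs with h
    · rfl
    · simp at h; simpa using h
  · split_ifs with h
    · rfl
    · simp at h; simpa using h
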